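-- pv_equiv track=rewrite | github.com/karpov-nick/NeMo | examples/nlp/intent_slot_classification/data/prompt_learning_assistant_preprocessing.py | get_slots
-- ===== SOURCE A (Python) =====
-- def get_slots(slot_line, utterance, slot_dict):
--     """
--     Formats slot labels for an utterance. Ensures the multiword
--     slot labels are grouped together. For example the words
--     'birthday party' should be grouped together under the
--     same event_name label like event_name(birthday party)
--     instead of event_name(birthday), event_name(party).
--
--     """
--     # Get slots and their labels
--     utterance_words = utterance.split()
--     slots_and_labels = []
--     prev_slot_label = 'O'
--     prev_word_idx = 0
--     current_word = ""
--
--     if len(utterance_words) != len(slot_line):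
--         slot_line = slot_line[1:]
--
--     for word_idx, slot_label_idx in enumerate(slot_line):
--         word = utterance_words[word_idx]
--         slot_label = slot_dict[int(slot_label_idx)].strip()
--
--         # Only care about words with labels
--         if slot_label != 'O':
--
--             # Keep multiword answers together
--             if prev_slot_label == slot_label and prev_word_idx == word_idx - 1:
--                 current_word += " " + word
--
--             # Previous answer has ended and a new one is starting
--             else:
--                 if current_word != "":
--                     slots_and_labels.append(f"{prev_slot_label}({current_word})")
--                 current_word = word
--
--             prev_word_idx = word_idx
--             prev_slot_label = slot_label.strip()
--
--     # Add last labeled word to list of slots and labels if the utterance is over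
--     if current_word != "" and prev_slot_label != 'O':
--         slots_and_labels.append(f"{prev_slot_label}({current_word})")
--
--     # Format slot labels
--     if not slots_and_labels:
--         slot_labels = "None"
--     else:
--         slot_labels = ", ".join(slots_and_labels)
--
--     return slot_labels
-- ===== SOURCE B (Python) =====
-- def get_slots(slot_line, utterance, slot_dict):
--     """Alternative decomposition: collect labeled (index, label, word) triples
--     first, then group contiguous same-label runs into word lists, then format."""
--     words = utterance.split()
--     if len(words) != len(slot_line):
--         slot_line = slot_line[1:]
--
--     # Phase 1: per-index lookups (same exceptions as the original), keep labeled words only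
--     triples = [(i, slot_dict[int(idx)].strip(), words[i]) for i, idx in enumerate(slot_line)]
--     labeled = [t for t in triples if t[1] != 'O']
--
--     # Phase 2: group consecutive runs (same label, contiguous word indices)
--     groups = []  # list of (label, last_index, [words])
--     for i, lab, w in labeled:
--         if groups and groups[-1][0] == lab and groups[-1][1] == i - 1:
--             prev_lab, _, ws = groups[-1]
--             groups[-1] = (prev_lab, i, ws + [w])
--         else:
--             groups.append((lab, i, [w]))
--
--     # Phase 3: format
--     parts = [f"{lab}({' '.join(ws)})" for lab, _, ws in groups]
--     return ', '.join(parts) if parts else 'None'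
-- ===== Notes on version B (the rewrite author's own statement) =====
-- stated objective: alternative
-- what changed: Replaces A's single-pass state machine (prev-label/prev-index/current-word string accumulation with emit-on-boundary and a final flush) by three separate phases: collect (index, label, word) triples for non-'O' labels, group contiguous same-label runs into word lists, then format and join the groups.
import Mathlib
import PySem

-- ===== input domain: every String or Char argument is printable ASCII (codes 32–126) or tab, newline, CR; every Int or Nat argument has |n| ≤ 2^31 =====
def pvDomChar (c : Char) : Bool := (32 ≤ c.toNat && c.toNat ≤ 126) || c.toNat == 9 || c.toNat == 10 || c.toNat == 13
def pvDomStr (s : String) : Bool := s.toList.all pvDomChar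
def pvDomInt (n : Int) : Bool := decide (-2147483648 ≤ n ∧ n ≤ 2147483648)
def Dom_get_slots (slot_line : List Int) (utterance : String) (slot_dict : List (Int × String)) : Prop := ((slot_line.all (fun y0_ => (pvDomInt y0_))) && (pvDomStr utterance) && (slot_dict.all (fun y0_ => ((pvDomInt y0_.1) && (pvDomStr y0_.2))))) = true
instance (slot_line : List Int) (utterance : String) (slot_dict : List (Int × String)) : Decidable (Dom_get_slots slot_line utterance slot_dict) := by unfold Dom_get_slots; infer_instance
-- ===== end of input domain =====

-- B regroups the slot labels in three separate phases (collect labeled triples, group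
-- contiguous same-label runs into word lists, format) instead of A's single-pass
-- state machine; objective: alternative decomposition, same cost.

-- ===== PORT A =====
-- strings are ported on the List Char level (PySem.Chars); f"{lab}({cur})" is lab ++ "(" ++ cur ++ ")"
def pvAFmt (lab cur : List Char) : List Char := lab ++ '(' :: (cur ++ [')'])

-- the for-loop of A: state (slots_and_labels, prev_slot_label, prev_word_idx, current_word);
-- none = IndexError (utterance_words[word_idx]) or KeyError (slot_dict[...])
def pvAAux (words : List (List Char)) (sd : PySem.Dict Int String) :
    List (Int × Int) → List (List Char) → List Char → Int → List Char →
    Option (List (List Char) × List Char × Int × List Char)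
  | [], sal, plab, pidx, cur => some (sal, plab, pidx, cur)
  | (i, idx) :: rest, sal, plab, pidx, cur =>
    match PySem.List.pyGet? words i, PySem.Dict.get? sd idx with
    | some word, some raw =>
      let slotLabel := PySem.Chars.strip raw.toList
      if slotLabel ≠ ['O'] then
        if plab = slotLabel ∧ pidx = i - 1 then
          pvAAux words sd rest sal (PySem.Chars.strip slotLabel) i (cur ++ ' ' :: word)
        else
          pvAAux words sd rest (if cur ≠ [] then sal ++ [pvAFmt plab cur] else sal)
            (PySem.Chars.strip slotLabel) i word
      else pvAAux words sd rest sal plab pidx cur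
    | _, _ => none

def get_slots (slot_line : List Int) (utterance : String) (slot_dict : List (Int × String)) : String :=
  let words := PySem.Chars.split₀ utterance.toList          -- utterance.split()
  let line := if words.length ≠ slot_line.length then slot_line.drop 1 else slot_line  -- slot_line[1:]
  match pvAAux words (PySem.Dict.mk slot_dict) (PySem.List.enumerate line) [] ['O'] 0 [] with
  | none => ""   -- unreachable under Pre_get_slots (Python raises IndexError/KeyError there)
  | some (sal, plab, _, cur) =>
    let sal' := if cur ≠ [] ∧ plab ≠ ['O'] then sal ++ [pvAFmt plab cur] else sal
    if sal' = [] then "None" else String.ofList (PySem.Chars.join [',', ' '] sal')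

-- ===== PORT B =====
-- phase 1 of Source B: the triples comprehension (same per-index lookups, none = same exceptions)
def pvBTriples (words : List (List Char)) (sd : PySem.Dict Int String) :
    List (Int × Int) → Option (List (Int × List Char × List Char))
  | [] => some []
  | (i, idx) :: rest =>
    match PySem.List.pyGet? words i, PySem.Dict.get? sd idx with
    | some w, some raw => (pvBTriples words sd rest).map ((i, PySem.Chars.strip raw.toList, w) :: ·)
    | _, _ => none

-- phase 2 of Source B: group contiguous same-label runs, updating the last group in place
def pvBGroup : List (Int × List Char × List Char) → List (List Char × Int × List (List Char)) →
    List (List Char × Int × List (List Char))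
  | [], gs => gs
  | (i, lab, w) :: rest, gs =>
    pvBGroup rest
      (match gs.getLast? with
        | some g =>
          if g.1 = lab ∧ g.2.1 = i - 1 then gs.dropLast ++ [(g.1, i, g.2.2 ++ [w])]
          else gs ++ [(lab, i, [w])]
        | none => [(lab, i, [w])])

def get_slots_alt (slot_line : List Int) (utterance : String) (slot_dict : List (Int × String)) : String :=
  let words := PySem.Chars.split₀ utterance.toList
  let line := if words.length ≠ slot_line.length then slot_line.drop 1 else slot_line
  match pvBTriples words (PySem.Dict.mk slot_dict) (PySem.List.enumerate line) with
  | none => ""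
  | some ts =>
    let labeled := ts.filter (fun t => t.2.1 ≠ ['O'])
    let groups := pvBGroup labeled []
    let parts := groups.map (fun g => g.1 ++ '(' :: (PySem.Chars.join [' '] g.2.2 ++ [')']))
    if parts = [] then "None" else String.ofList (PySem.Chars.join [',', ' '] parts)

-- ===== PRECONDITION & SPEC =====
-- Pre_: exactly where the Python A returns: after the possible [1:] trim, every word index
-- is inside utterance.split() and every slot index is a key of slot_dict.
def Pre_get_slots (slot_line : List Int) (utterance : String) (slot_dict : List (Int × String)) : Prop :=
  let words := PySem.Chars.split₀ utterance.toList
  let line := if words.length ≠ slot_line.length then slot_line.drop 1 else slot_line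
  line.length ≤ words.length ∧ ∀ idx ∈ line, (PySem.Dict.mk slot_dict).contains idx
instance (slot_line : List Int) (utterance : String) (slot_dict : List (Int × String)) : Decidable (Pre_get_slots slot_line utterance slot_dict) := by unfold Pre_get_slots; infer_instance

def pvWitness_get_slots : List Int × String × (List (Int × String)) :=
  ([1, 0, 1], "see you next week", [(0, "O"), (1, "time")])

def Spec_get_slots (slot_line : List Int) (utterance : String) (slot_dict : List (Int × String)) (out : String) : Prop := out = get_slots_alt slot_line utterance slot_dict
instance (slot_line : List Int) (utterance : String) (slot_dict : List (Int × String)) (out : String) : Decidable (Spec_get_slots slot_line utterance slot_dict out) := by unfold Spec_get_slots; infer_instance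

-- ===== CLAIM (what is proved, stated in full; the proofs are below) =====
def Claim_equal_get_slots : Prop := ∀ (slot_line : List Int) (utterance : String) (slot_dict : List (Int × String)), Dom_get_slots slot_line utterance slot_dict → Pre_get_slots slot_line utterance slot_dict → Spec_get_slots slot_line utterance slot_dict (get_slots slot_line utterance slot_dict)

-- ===== LEMMAS AND PROOFS =====

-- proof-side abstraction of one iteration of A's loop on a labeled triple (i, label, word)
def pvStepA (st : List (List Char) × List Char × Int × List Char) (t : Int × List Char × List Char) :
    List (List Char) × List Char × Int × List Char :=
  if st.2.1 = t.2.1 ∧ st.2.2.1 = t.1 - 1 then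
    (st.1, PySem.Chars.strip t.2.1, t.1, st.2.2.2 ++ ' ' :: t.2.2)
  else
    ((if st.2.2.2 ≠ [] then st.1 ++ [pvAFmt st.2.1 st.2.2.2] else st.1),
      PySem.Chars.strip t.2.1, t.1, t.2.2)

-- proof-side abstraction of one iteration of B's grouping loop
def pvStepG (gs : List (List Char × Int × List (List Char))) (t : Int × List Char × List Char) :
    List (List Char × Int × List (List Char)) :=
  match gs.getLast? with
  | some g =>
    if g.1 = t.2.1 ∧ g.2.1 = t.1 - 1 then gs.dropLast ++ [(g.1, t.1, g.2.2 ++ [t.2.2])]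
    else gs ++ [(t.2.1, t.1, [t.2.2])]
  | none => [(t.2.1, t.1, [t.2.2])]

-- B's formatting of one group (the lambda of B's phase 3, named for the proofs)
def pvBFmt : List Char × Int × List (List Char) → List Char :=
  fun g => g.1 ++ '(' :: (PySem.Chars.join [' '] g.2.2 ++ [')'])

-- the A-state a group list corresponds to
def pvAbs (gs : List (List Char × Int × List (List Char))) :
    List (List Char) × List Char × Int × List Char :=
  match gs.getLast? with
  | none => ([], ['O'], 0, [])
  | some g => (gs.dropLast.map pvBFmt, g.1, g.2.1, PySem.Chars.join [' '] g.2.2)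

-- A's final flush after the loop
def pvFlush (st : List (List Char) × List Char × Int × List Char) : List (List Char) :=
  if st.2.2.2 ≠ [] ∧ st.2.1 ≠ ['O'] then st.1 ++ [pvAFmt st.2.1 st.2.2.2] else st.1

-- invariant on B's group list: groups are nonempty lists of nonempty words, last label ≠ 'O'
def pvGood (gs : List (List Char × Int × List (List Char))) : Prop :=
  (∀ g ∈ gs, g.2.2 ≠ [] ∧ ∀ w ∈ g.2.2, w ≠ []) ∧ (∀ g ∈ gs.getLast?, g.1 ≠ ['O'])

theorem pvBGroup_cons (t : Int × List Char × List Char)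
    (rest : List (Int × List Char × List Char)) (gs : List (List Char × Int × List (List Char))) :
    pvBGroup (t :: rest) gs = pvBGroup rest (pvStepG gs t) := by
  obtain ⟨i, lab, w⟩ := t; rfl

theorem pv_dw_prefix {α : Type} (p : α → Bool) {t l : List α} (ht : t <+: l)
    (h : l.dropWhile p = l) : t.dropWhile p = t := by
  cases t with
  | nil => simp
  | cons a t' =>
    cases l with
    | nil => simp at ht
    | cons b l' =>
      obtain ⟨r, hr⟩ := ht
      rw [List.cons_append] at hr
      injection hr with h1 h2
      subst h1
      by_cases hp : p a
      · exfalso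
        rw [List.dropWhile_cons_of_pos hp] at h
        have hle := List.length_dropWhile_le p l'
        have := congrArg List.length h
        simp at this
        omega
      · rw [List.dropWhile_cons_of_neg hp]

theorem pv_rstrip_prefix (s : List Char) : PySem.Chars.rstrip s <+: s := by
  unfold PySem.Chars.rstrip
  have h2 : (List.dropWhile PySem.Chars.isspace s.reverse).reverse <+: s.reverse.reverse :=
    List.reverse_prefix.mpr (List.dropWhile_suffix _)
  simpa using h2

theorem pv_rstrip_idem (s : List Char) :
    PySem.Chars.rstrip (PySem.Chars.rstrip s) = PySem.Chars.rstrip s := by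
  unfold PySem.Chars.rstrip
  simp [List.dropWhile_idempotent]

theorem pv_strip_idem (s : List Char) :
    PySem.Chars.strip (PySem.Chars.strip s) = PySem.Chars.strip s := by
  unfold PySem.Chars.strip PySem.Chars.lstrip
  rw [pv_dw_prefix PySem.Chars.isspace (pv_rstrip_prefix _) (List.dropWhile_idempotent _ _),
    pv_rstrip_idem]

theorem pv_go_ne_nil (s : List Char) : ∀ (cur : List Char) (acc : List (List Char)),
    (∀ w ∈ acc, w ≠ []) → ∀ w ∈ PySem.Chars.split₀.go s cur acc, w ≠ [] := by
  induction s with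
  | nil =>
    intro cur acc hacc w hw
    rw [PySem.Chars.split₀.go.eq_def] at hw
    by_cases hc : cur.isEmpty
    · simp [hc] at hw
      exact hacc w hw
    · simp [hc] at hw
      rcases hw with hw | hw
      · exact hacc w hw
      · have hcc : cur ≠ [] := by simpa [List.isEmpty_iff] using hc
        subst hw
        simpa using hcc
  | cons c rest ih =>
    intro cur acc hacc w hw
    rw [PySem.Chars.split₀.go.eq_def] at hw
    by_cases hsp : PySem.Chars.isspace c
    · by_cases hc : cur.isEmpty
      · simp only [hsp, hc, if_true] at hw
        exact ih [] acc hacc w hw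
      · simp only [hsp, hc, if_true, Bool.false_eq_true, if_false] at hw
        refine ih [] (cur.reverse :: acc) ?_ w hw
        intro w' hw'
        rcases List.mem_cons.mp hw' with rfl | h'
        · simp [List.isEmpty_iff] at hc
          simpa using hc
        · exact hacc _ h'
    · simp only [hsp, Bool.false_eq_true, if_false] at hw
      exact ih (c :: cur) acc hacc w hw

theorem pv_split₀_ne_nil {s w : List Char} (h : w ∈ PySem.Chars.split₀ s) : w ≠ [] := by
  unfold PySem.Chars.split₀ at h
  exact pv_go_ne_nil s [] [] (by simp) w h

theorem pv_join_ne_nil {ws : List (List Char)} (h0 : ws ≠ []) (h1 : ∀ w ∈ ws, w ≠ []) :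
    PySem.Chars.join [' '] ws ≠ [] := by
  cases ws with
  | nil => simp at h0
  | cons a l =>
    cases l with
    | nil => simpa [PySem.Chars.join_singleton] using h1 a (by simp)
    | cons b m =>
      rw [PySem.Chars.join_cons_cons]
      have ha := h1 a (by simp)
      simp [ha]

theorem pv_join_append_singleton (sep w : List Char) :
    ∀ (ws : List (List Char)), ws ≠ [] →
    PySem.Chars.join sep (ws ++ [w]) = PySem.Chars.join sep ws ++ sep ++ w := by
  intro ws
  induction ws with
  | nil => simp
  | cons a l ih =>
    intro _
    cases l with
    | nil => simp [PySem.Chars.join_cons_cons, PySem.Chars.join_singleton]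
    | cons b m =>
      have hnb : (b :: m : List (List Char)) ≠ [] := by simp
      have h2 := ih hnb
      simp only [List.cons_append] at h2 ⊢
      rw [PySem.Chars.join_cons_cons, h2, PySem.Chars.join_cons_cons]
      simp [List.append_assoc]

theorem pv_commute {gs : List (List Char × Int × List (List Char))}
    (hg : pvGood gs) {i : Int} {lab w : List Char}
    (hlab : lab ≠ ['O']) (hstrip : PySem.Chars.strip lab = lab) (hw : w ≠ []) :
    pvStepA (pvAbs gs) (i, lab, w) = pvAbs (pvStepG gs (i, lab, w)) := by
  rcases List.eq_nil_or_concat gs with rfl | ⟨gs', g, rfl⟩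
  · simp only [pvAbs, pvStepG, List.getLast?_nil]
    simp only [pvStepA]
    rw [if_neg (fun hcon => hlab hcon.1.symm)]
    simp [PySem.Chars.join_singleton, hstrip]
  · rw [List.concat_eq_append] at hg ⊢
    have hgmem : g ∈ gs' ++ [g] := by simp
    have hws : g.2.2 ≠ [] := (hg.1 g hgmem).1
    have hwsall : ∀ w' ∈ g.2.2, w' ≠ [] := (hg.1 g hgmem).2
    have habs : pvAbs (gs' ++ [g]) =
        (gs'.map pvBFmt, g.1, g.2.1, PySem.Chars.join [' '] g.2.2) := by
      simp [pvAbs]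
    by_cases hcond : g.1 = lab ∧ g.2.1 = i - 1
    · have hstepg : pvStepG (gs' ++ [g]) (i, lab, w) = gs' ++ [(g.1, i, g.2.2 ++ [w])] := by
        simp [pvStepG, hcond]
      rw [habs, hstepg]
      simp only [pvStepA]
      rw [if_pos (by exact ⟨hcond.1, hcond.2⟩)]
      have habs2 : pvAbs (gs' ++ [(g.1, i, g.2.2 ++ [w])]) =
          (gs'.map pvBFmt, g.1, i, PySem.Chars.join [' '] (g.2.2 ++ [w])) := by
        simp [pvAbs]
      rw [habs2, pv_join_append_singleton _ _ _ hws, hstrip, hcond.1]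
      simp [List.append_assoc]
    · have hstepg : pvStepG (gs' ++ [g]) (i, lab, w) = (gs' ++ [g]) ++ [(lab, i, [w])] := by
        simp only [pvStepG, List.getLast?_concat]
        rw [if_neg hcond]
      rw [habs, hstepg]
      simp only [pvStepA]
      rw [if_neg (by simpa using hcond)]
      have hcur : PySem.Chars.join [' '] g.2.2 ≠ [] := pv_join_ne_nil hws hwsall
      have habs2 : pvAbs ((gs' ++ [g]) ++ [(lab, i, [w])]) =
          ((gs' ++ [g]).map pvBFmt, lab, i, w) := by
        simp [pvAbs, PySem.Chars.join_singleton]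
      rw [habs2]
      simp only [if_pos hcur, hstrip]
      simp [List.map_append, pvBFmt, pvAFmt]
    
theorem pv_good_step {gs : List (List Char × Int × List (List Char))}
    (hg : pvGood gs) {i : Int} {lab w : List Char} (hlab : lab ≠ ['O']) (hw : w ≠ []) :
    pvGood (pvStepG gs (i, lab, w)) := by
  obtain ⟨h1, h2⟩ := hg
  rcases List.eq_nil_or_concat gs with rfl | ⟨gs', g, rfl⟩
  · constructor
    · intro g' hgmem
      simp [pvStepG] at hgmem
      subst hgmem
      simp [hw]
    · simp [pvStepG, hlab]
  · rw [List.concat_eq_append] at *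
    by_cases hcond : g.1 = lab ∧ g.2.1 = i - 1
    · have hstepg : pvStepG (gs' ++ [g]) (i, lab, w) = gs' ++ [(g.1, i, g.2.2 ++ [w])] := by
        simp [pvStepG, hcond]
      rw [hstepg]
      constructor
      · intro g' hmem
        rcases List.mem_append.mp hmem with h | h
        · exact h1 g' (by simp [h])
        · simp at h
          subst h
          refine ⟨by simp, ?_⟩
          intro w' hw'
          rcases List.mem_append.mp hw' with h' | h'
          · exact (h1 g (by simp)).2 w' h'
          · simp at h'
            subst h'
            exact hw
      · intro g' hmem
        simp at hmem
        subst hmem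
        simpa [hcond.1] using hlab
    · have hstepg : pvStepG (gs' ++ [g]) (i, lab, w) = (gs' ++ [g]) ++ [(lab, i, [w])] := by
        simp only [pvStepG, List.getLast?_concat]
        rw [if_neg hcond]
      rw [hstepg]
      constructor
      · intro g' hmem
        rcases List.mem_append.mp hmem with h | h
        · exact h1 g' h
        · simp at h
          subst h
          simp [hw]
      · intro g' hmem
        simp at hmem
        subst hmem
        simpa using hlab

theorem pv_flush_abs {gs : List (List Char × Int × List (List Char))} (hg : pvGood gs) :
    pvFlush (pvAbs gs) = gs.map pvBFmt := by
  rcases List.eq_nil_or_concat gs with rfl | ⟨gs', g, rfl⟩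
  · simp [pvFlush, pvAbs]
  · rw [List.concat_eq_append] at hg ⊢
    have hgmem : g ∈ gs' ++ [g] := by simp
    have hcur : PySem.Chars.join [' '] g.2.2 ≠ [] :=
      pv_join_ne_nil (hg.1 g hgmem).1 (hg.1 g hgmem).2
    have hlab : g.1 ≠ ['O'] := hg.2 g (by simp)
    have habs : pvAbs (gs' ++ [g]) =
        (gs'.map pvBFmt, g.1, g.2.1, PySem.Chars.join [' '] g.2.2) := by
      simp [pvAbs]
    rw [habs]
    simp only [pvFlush]
    rw [if_pos ⟨hcur, hlab⟩]
    simp [List.map_append, pvBFmt, pvAFmt]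

theorem pv_main (ts : List (Int × List Char × List Char)) :
    ∀ gs, (∀ t ∈ ts, t.2.1 ≠ ['O'] ∧ PySem.Chars.strip t.2.1 = t.2.1 ∧ t.2.2 ≠ []) →
    pvGood gs →
    pvFlush (List.foldl pvStepA (pvAbs gs) ts) = (pvBGroup ts gs).map pvBFmt := by
  induction ts with
  | nil =>
    intro gs _ hg
    simpa [pvBGroup] using pv_flush_abs hg
  | cons t rest ih =>
    intro gs h hg
    obtain ⟨i, lab, w⟩ := t
    obtain ⟨hlab, hstrip, hw⟩ := h (i, lab, w) (by simp)
    rw [List.foldl_cons, pvBGroup_cons, pv_commute hg hlab hstrip hw]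
    exact ih _ (fun t ht => h t (List.mem_cons_of_mem _ ht)) (pv_good_step hg hlab hw)

theorem pv_A_fold (words : List (List Char)) (sd : PySem.Dict Int String) :
    ∀ (ps : List (Int × Int)) (sal : List (List Char)) (plab : List Char) (pidx : Int)
      (cur : List Char) (ts : List (Int × List Char × List Char)),
    pvBTriples words sd ps = some ts →
    pvAAux words sd ps sal plab pidx cur =
      some (List.foldl pvStepA (sal, plab, pidx, cur) (ts.filter (fun t => t.2.1 ≠ ['O']))) := by
  intro ps
  induction ps with
  | nil =>
    intro sal plab pidx cur ts h
    simp only [pvBTriples, Option.some.injEq] at h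
    subst h
    simp [pvAAux]
  | cons p rest ih =>
    obtain ⟨i, idx⟩ := p
    intro sal plab pidx cur ts h
    simp only [pvBTriples] at h
    cases hga : PySem.List.pyGet? words i with
    | none => rw [hga] at h; simp at h
    | some w =>
      cases hgd : PySem.Dict.get? sd idx with
      | none => rw [hga, hgd] at h; simp at h
      | some raw =>
        rw [hga, hgd] at h
        simp only [Option.map_eq_some_iff] at h
        obtain ⟨ts', h1, h2⟩ := h
        subst h2
        simp only [pvAAux]
        rw [hga, hgd]
        dsimp only
        by_cases hO : PySem.Chars.strip raw.toList ≠ ['O']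
        · rw [if_pos hO]
          by_cases hc : plab = PySem.Chars.strip raw.toList ∧ pidx = i - 1
          · rw [if_pos hc, ih _ _ _ _ _ h1]
            rw [List.filter_cons_of_pos (by simpa using hO), List.foldl_cons]
            have hstep : pvStepA (sal, plab, pidx, cur) (i, PySem.Chars.strip raw.toList, w) =
                (sal, PySem.Chars.strip (PySem.Chars.strip raw.toList), i, cur ++ ' ' :: w) := by
              simp only [pvStepA]
              rw [if_pos hc]
            rw [hstep]
          · rw [if_neg hc, ih _ _ _ _ _ h1]
            rw [List.filter_cons_of_pos (by simpa using hO), List.foldl_cons]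
            have hstep : pvStepA (sal, plab, pidx, cur) (i, PySem.Chars.strip raw.toList, w) =
                ((if cur ≠ [] then sal ++ [pvAFmt plab cur] else sal),
                  PySem.Chars.strip (PySem.Chars.strip raw.toList), i, w) := by
              simp only [pvStepA]
              rw [if_neg hc]
            rw [hstep]
        · rw [if_neg hO]
          rw [ih _ _ _ _ _ h1]
          congr 2
          rw [List.filter_cons_of_neg (by simpa using hO)]

theorem pv_triples_props (words : List (List Char)) (sd : PySem.Dict Int String) :
    ∀ (ps : List (Int × Int)) (ts : List (Int × List Char × List Char)),
    pvBTriples words sd ps = some ts →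
    ∀ t ∈ ts, (∃ raw : String, t.2.1 = PySem.Chars.strip raw.toList) ∧ t.2.2 ∈ words := by
  intro ps
  induction ps with
  | nil =>
    intro ts h
    simp only [pvBTriples, Option.some.injEq] at h
    subst h
    simp
  | cons p rest ih =>
    obtain ⟨i, idx⟩ := p
    intro ts h
    simp only [pvBTriples] at h
    cases hga : PySem.List.pyGet? words i with
    | none => rw [hga] at h; simp at h
    | some w =>
      cases hgd : PySem.Dict.get? sd idx with
      | none => rw [hga, hgd] at h; simp at h
      | some raw =>
        rw [hga, hgd] at h
        simp only [Option.map_eq_some_iff] at h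
        obtain ⟨ts', h1, h2⟩ := h
        subst h2
        intro t ht
        rcases List.mem_cons.mp ht with rfl | ht'
        · refine ⟨⟨raw, rfl⟩, ?_⟩
          have hmem : w ∈ words := by
            unfold PySem.List.pyGet? at hga
            cases hk : PySem.List.pyIdx? words.length i with
            | none => rw [hk] at hga; simp at hga
            | some k =>
              rw [hk] at hga
              have hga' : words[k]? = some w := hga
              exact List.mem_of_getElem? hga'
          exact hmem
        · exact ih ts' h1 t ht'

theorem pv_pre_some (words : List (List Char)) (sd : PySem.Dict Int String) :
    ∀ (ps : List (Int × Int)),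
    (∀ p ∈ ps, (PySem.List.pyGet? words p.1).isSome = true ∧ (PySem.Dict.get? sd p.2).isSome = true) →
    ∃ ts, pvBTriples words sd ps = some ts := by
  intro ps
  induction ps with
  | nil => intro _; exact ⟨[], rfl⟩
  | cons p rest ih =>
    obtain ⟨i, idx⟩ := p
    intro h
    obtain ⟨h1, h2⟩ := h (i, idx) (by simp)
    obtain ⟨w, hw⟩ := Option.isSome_iff_exists.mp h1
    obtain ⟨raw, hraw⟩ := Option.isSome_iff_exists.mp h2
    obtain ⟨ts, hts⟩ := ih (fun p hp => h p (List.mem_cons_of_mem _ hp))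
    refine ⟨(i, PySem.Chars.strip raw.toList, w) :: ts, ?_⟩
    simp only [pvBTriples]
    rw [hw, hraw, hts]
    rfl

-- ===== VERDICT (by name: the statement is the Claim_ definition above) =====
theorem get_slots_spec : Claim_equal_get_slots := by
  unfold Claim_equal_get_slots
  intro slot_line utterance slot_dict _ hpre
  unfold Spec_get_slots
  simp only [Pre_get_slots] at hpre
  simp only [get_slots, get_slots_alt]
  set W := PySem.Chars.split₀ utterance.toList with hWdef
  set L := if W.length ≠ slot_line.length then slot_line.drop 1 else slot_line with hLdef
  obtain ⟨hlen, hkeys⟩ := hpre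
  have hall : ∀ p ∈ PySem.List.enumerate L,
      (PySem.List.pyGet? W p.1).isSome = true ∧
      ((PySem.Dict.mk slot_dict).get? p.2).isSome = true := by
    intro p hp
    rw [PySem.List.mem_enumerate_iff] at hp
    obtain ⟨k, hk, rfl⟩ := hp
    constructor
    · have hz : ((0 : Int) + (k : Int)) = (k : Int) := by omega
      rw [hz, PySem.List.pyGet?_natCast]
      have hkW : k < W.length := lt_of_lt_of_le hk hlen
      simp [List.getElem?_eq_getElem hkW]
    · have hmem : L[k] ∈ L := List.getElem_mem hk
      have := hkeys (L[k]) hmem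
      rw [PySem.Dict.contains_eq_isSome_get?] at this
      simpa using this
  obtain ⟨ts, hts⟩ := pv_pre_some W (PySem.Dict.mk slot_dict) _ hall
  rw [hts, pv_A_fold W _ _ [] ['O'] 0 [] ts hts]
  set st := List.foldl pvStepA ([], ['O'], (0 : Int), []) (ts.filter (fun t => t.2.1 ≠ ['O'])) with hst
  obtain ⟨sal, plab, pidx, cur⟩ := st
  have hfilter : ∀ t ∈ ts.filter (fun t => t.2.1 ≠ ['O']),
      t.2.1 ≠ ['O'] ∧ PySem.Chars.strip t.2.1 = t.2.1 ∧ t.2.2 ≠ [] := by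
    intro t ht
    have hmem := List.mem_of_mem_filter ht
    have hpred : t.2.1 ≠ ['O'] := by simpa using List.of_mem_filter ht
    obtain ⟨⟨raw, hraw⟩, hwmem⟩ := pv_triples_props W _ _ _ hts t hmem
    rw [hWdef] at hwmem
    refine ⟨hpred, ?_, pv_split₀_ne_nil hwmem⟩
    rw [hraw]
    exact pv_strip_idem _
  have hmain := pv_main (ts.filter (fun t => t.2.1 ≠ ['O'])) [] hfilter ⟨by simp, by simp⟩
  rw [show pvAbs [] = (([], ['O'], 0, []) :
    List (List Char) × List Char × Int × List Char) from rfl] at hmain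
  rw [← hst] at hmain
  simp only [pvFlush] at hmain
  dsimp only
  rw [hmain]
  have hb : (fun g : List Char × Int × List (List Char) =>
      g.1 ++ '(' :: (PySem.Chars.join [' '] g.2.2 ++ [')'])) = pvBFmt := rfl
  rw [hb]
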